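-- pv_equiv track=rewrite | github.com/SirIconNick/fandomforge-engine | tools/fandomforge/intelligence/audio_synth.py | prompt_for_mood
-- ===== SOURCE A (Python) =====
-- def prompt_for_mood(mood: str, kind: str = "riser") -> str:
--     """Map a mood string to an AudioCraft prompt for the given SFX kind."""
--     m = mood.lower()
--     if kind == "riser":
--         if any(x in m for x in ("sad", "melancholy", "grief")):
--             return "slow orchestral riser, melancholic strings, emotional swell"
--         if any(x in m for x in ("tense", "dread", "anxious")):
--             return "suspense-building riser, cinematic dread, tension"
--         if any(x in m for x in ("triumph", "hope", "uplift")):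
--             return "triumphant orchestral riser, uplifting, hopeful swell"
--         if any(x in m for x in ("angry", "aggressive")):
--             return "aggressive cinematic riser, distorted metal, impact"
--         return "cinematic riser, dramatic, generic"
--     if kind == "impact":
--         if "sad" in m or "melancholy" in m:
--             return "soft low impact, orchestral, emotional"
--         if "tense" in m:
--             return "sharp low impact, dread, cinematic"
--         return "dramatic cinematic impact"
--     return f"cinematic {kind}"
-- ===== SOURCE B (Python) =====
-- # Collect-all-matches strategy: one flat (priority, kind, keyword, prompt) table; gather every
-- # matching row and return the minimum-priority hit, instead of A's short-circuiting branch ladder.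
-- TABLE = [
--     (0, "riser", "sad", "slow orchestral riser, melancholic strings, emotional swell"),
--     (0, "riser", "melancholy", "slow orchestral riser, melancholic strings, emotional swell"),
--     (0, "riser", "grief", "slow orchestral riser, melancholic strings, emotional swell"),
--     (1, "riser", "tense", "suspense-building riser, cinematic dread, tension"),
--     (1, "riser", "dread", "suspense-building riser, cinematic dread, tension"),
--     (1, "riser", "anxious", "suspense-building riser, cinematic dread, tension"),
--     (2, "riser", "triumph", "triumphant orchestral riser, uplifting, hopeful swell"),
--     (2, "riser", "hope", "triumphant orchestral riser, uplifting, hopeful swell"),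
--     (2, "riser", "uplift", "triumphant orchestral riser, uplifting, hopeful swell"),
--     (3, "riser", "angry", "aggressive cinematic riser, distorted metal, impact"),
--     (3, "riser", "aggressive", "aggressive cinematic riser, distorted metal, impact"),
--     (0, "impact", "sad", "soft low impact, orchestral, emotional"),
--     (0, "impact", "melancholy", "soft low impact, orchestral, emotional"),
--     (1, "impact", "tense", "sharp low impact, dread, cinematic"),
-- ]
-- DEFAULTS = {
--     "riser": "cinematic riser, dramatic, generic",
--     "impact": "dramatic cinematic impact",
-- }
--
--
-- def prompt_for_mood(mood: str, kind: str = "riser") -> str: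
--     """Map a mood string to an AudioCraft prompt for the given SFX kind."""
--     m = mood.lower()
--     hits = [(prio, prompt) for prio, k, kw, prompt in TABLE if k == kind and kw in m]
--     if hits:
--         return min(hits)[1]
--     return DEFAULTS.get(kind, f"cinematic {kind}")
-- ===== Notes on version B (the rewrite author's own statement) =====
-- stated objective: alternative
-- what changed: Replaced A's short-circuiting first-match branch ladder by a flat (priority, kind, keyword, prompt) table from which ALL matching rows are collected and the minimum-priority hit returned via min(), with a dict of per-kind defaults.
import Mathlib
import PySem

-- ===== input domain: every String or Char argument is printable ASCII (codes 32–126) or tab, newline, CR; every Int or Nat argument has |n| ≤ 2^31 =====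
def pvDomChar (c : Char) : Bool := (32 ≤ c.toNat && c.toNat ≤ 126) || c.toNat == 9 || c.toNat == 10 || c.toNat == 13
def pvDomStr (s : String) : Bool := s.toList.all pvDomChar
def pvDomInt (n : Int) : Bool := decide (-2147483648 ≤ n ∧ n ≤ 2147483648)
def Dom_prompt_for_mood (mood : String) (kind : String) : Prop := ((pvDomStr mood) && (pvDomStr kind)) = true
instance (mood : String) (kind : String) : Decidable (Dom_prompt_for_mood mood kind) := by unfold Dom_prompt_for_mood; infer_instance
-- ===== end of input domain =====

-- B replaces A's short-circuiting branch ladder by a flat (priority, kind, keyword, prompt)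
-- table: it collects ALL matching rows and returns the minimum-priority hit (alternative).

-- ===== PORT A =====
def prompt_for_mood (mood : String) (kind : String) : String :=
  let m := PySem.Str.lower mood
  if kind = "riser" then
    if ["sad", "melancholy", "grief"].any (fun x => PySem.Str.isIn x m) then
      "slow orchestral riser, melancholic strings, emotional swell"
    else if ["tense", "dread", "anxious"].any (fun x => PySem.Str.isIn x m) then
      "suspense-building riser, cinematic dread, tension"
    else if ["triumph", "hope", "uplift"].any (fun x => PySem.Str.isIn x m) then
      "triumphant orchestral riser, uplifting, hopeful swell"
    else if ["angry", "aggressive"].any (fun x => PySem.Str.isIn x m) then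
      "aggressive cinematic riser, distorted metal, impact"
    else
      "cinematic riser, dramatic, generic"
  else if kind = "impact" then
    if PySem.Str.isIn "sad" m || PySem.Str.isIn "melancholy" m then
      "soft low impact, orchestral, emotional"
    else if PySem.Str.isIn "tense" m then
      "sharp low impact, dread, cinematic"
    else
      "dramatic cinematic impact"
  else
    PySem.Str.join "" ["cinematic ", kind]

-- ===== PORT B =====
-- the flat rules table: (priority, kind, keyword, prompt)
def pvTable : List (Int × String × String × String) :=
  [ (0, "riser", "sad", "slow orchestral riser, melancholic strings, emotional swell"),
    (0, "riser", "melancholy", "slow orchestral riser, melancholic strings, emotional swell"),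
    (0, "riser", "grief", "slow orchestral riser, melancholic strings, emotional swell"),
    (1, "riser", "tense", "suspense-building riser, cinematic dread, tension"),
    (1, "riser", "dread", "suspense-building riser, cinematic dread, tension"),
    (1, "riser", "anxious", "suspense-building riser, cinematic dread, tension"),
    (2, "riser", "triumph", "triumphant orchestral riser, uplifting, hopeful swell"),
    (2, "riser", "hope", "triumphant orchestral riser, uplifting, hopeful swell"),
    (2, "riser", "uplift", "triumphant orchestral riser, uplifting, hopeful swell"),
    (3, "riser", "angry", "aggressive cinematic riser, distorted metal, impact"),
    (3, "riser", "aggressive", "aggressive cinematic riser, distorted metal, impact"),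
    (0, "impact", "sad", "soft low impact, orchestral, emotional"),
    (0, "impact", "melancholy", "soft low impact, orchestral, emotional"),
    (1, "impact", "tense", "sharp low impact, dread, cinematic") ]

def pvDefaults : PySem.Dict String String :=
  PySem.Dict.ofList
    [ ("riser", "cinematic riser, dramatic, generic"),
      ("impact", "dramatic cinematic impact") ]

-- Python tuple '<' on (int, str): ints, then code-point lexicographic on the strings
-- (exact: Python str '<' is '<' on toList; String's own '<' is not kernel-reducible)
def pvTupLt (a b : Int × String) : Bool :=
  decide (a.1 < b.1) || (!decide (b.1 < a.1) && decide (a.2.toList < b.2.toList))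

-- min(hits): left-to-right fold keeping the first minimum (Python's min)
def pvMin? (xs : List (Int × String)) : Option (Int × String) :=
  xs.foldl (fun acc x =>
    match acc with
    | none => some x
    | some m => if pvTupLt x m then some x else some m) none

def prompt_for_mood_alt (mood : String) (kind : String) : String :=
  let m := PySem.Str.lower mood
  let hits := (pvTable.filter (fun r => r.2.1 == kind && PySem.Str.isIn r.2.2.1 m)).map
      (fun r => (r.1, r.2.2.2))
  match pvMin? hits with
  | some p => p.2
  | none => pvDefaults.getD kind (PySem.Str.join "" ["cinematic ", kind])

-- ===== PRECONDITION & SPEC =====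
def Spec_prompt_for_mood (mood : String) (kind : String) (out : String) : Prop := out = prompt_for_mood_alt mood kind
instance (mood : String) (kind : String) (out : String) : Decidable (Spec_prompt_for_mood mood kind out) := by unfold Spec_prompt_for_mood; infer_instance

-- ===== CLAIM (what is proved, stated in full; the proofs are below) =====
def Claim_equal_prompt_for_mood : Prop := ∀ (mood : String) (kind : String), Dom_prompt_for_mood mood kind → Spec_prompt_for_mood mood kind (prompt_for_mood mood kind)

-- ===== LEMMAS AND PROOFS =====

-- ===== VERDICT (by name: the statement is the Claim_ definition above) =====
set_option maxHeartbeats 4000000 in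
theorem prompt_for_mood_spec : Claim_equal_prompt_for_mood := by
  intro mood kind _
  unfold Spec_prompt_for_mood prompt_for_mood prompt_for_mood_alt pvTable pvDefaults
  by_cases h1 : kind = "riser"
  · subst h1
    rw [if_pos rfl]
    have ei : (("impact" : String) == "riser") = false := by decide
    simp only [List.filter_cons, List.filter_nil, beq_self_eq_true, Bool.true_and, ei,
      Bool.false_and, Bool.false_eq_true, if_false, List.any_cons, List.any_nil, Bool.or_false]
    generalize PySem.Str.isIn "sad" (PySem.Str.lower mood) = b1
    generalize PySem.Str.isIn "melancholy" (PySem.Str.lower mood) = b2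
    generalize PySem.Str.isIn "grief" (PySem.Str.lower mood) = b3
    generalize PySem.Str.isIn "tense" (PySem.Str.lower mood) = b4
    generalize PySem.Str.isIn "dread" (PySem.Str.lower mood) = b5
    generalize PySem.Str.isIn "anxious" (PySem.Str.lower mood) = b6
    generalize PySem.Str.isIn "triumph" (PySem.Str.lower mood) = b7
    generalize PySem.Str.isIn "hope" (PySem.Str.lower mood) = b8
    generalize PySem.Str.isIn "uplift" (PySem.Str.lower mood) = b9
    generalize PySem.Str.isIn "angry" (PySem.Str.lower mood) = b10
    generalize PySem.Str.isIn "aggressive" (PySem.Str.lower mood) = b11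
    revert b1 b2 b3 b4 b5 b6 b7 b8 b9 b10 b11
    decide
  · by_cases h2 : kind = "impact"
    · subst h2
      rw [if_neg h1, if_pos rfl]
      have er : (("riser" : String) == "impact") = false := by decide
      simp only [List.filter_cons, List.filter_nil, beq_self_eq_true, Bool.true_and, er,
        Bool.false_and, Bool.false_eq_true, if_false]
      generalize PySem.Str.isIn "sad" (PySem.Str.lower mood) = b1
      generalize PySem.Str.isIn "melancholy" (PySem.Str.lower mood) = b2
      generalize PySem.Str.isIn "tense" (PySem.Str.lower mood) = b4
      revert b1 b2 b4
      decide
    · have e1 : (("riser" : String) == kind) = false := by simpa using fun h => h1 h.symm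
      have e2 : (("impact" : String) == kind) = false := by simpa using fun h => h2 h.symm
      have hof : PySem.Dict.ofList
          [("riser", "cinematic riser, dramatic, generic"),
           ("impact", "dramatic cinematic impact")] =
          PySem.Dict.mk
            [("riser", "cinematic riser, dramatic, generic"),
             ("impact", "dramatic cinematic impact")] := by decide
      simp [h1, h2, e1, e2, pvMin?, hof, PySem.Dict.getD, PySem.Dict.get?]
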